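-- pv_equiv track=rewrite | github.com/uashneiyash/passmanager | passmananger.py | check_password_warnings
-- ===== SOURCE A (Python) =====
-- import string
--
-- def check_password_warnings(password):
--     """Check for common password weaknesses."""
--     warnings = []
--     if len(password) < 8:
--         warnings.append("Password is too short (less than 8 characters).")
--     if not any(c in string.ascii_uppercase for c in password):
--         warnings.append("Password lacks uppercase letters.")
--     if not any(c in string.ascii_lowercase for c in password):
--         warnings.append("Password lacks lowercase letters.")
--     if not any(c in string.digits for c in password):
--         warnings.append("Password lacks digits.")
--     if not any(c in string.punctuation for c in password):
--         warnings.append("Password lacks special characters.")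
--     if " " in password:
--         warnings.append("Password contains spaces, which may not be supported by all systems.")
--     if is_common_sequence(password):
--         warnings.append("Password contains a common sequence or pattern.")
--     return warnings
--
-- def is_common_sequence(password):
--     """Check if the password contains common sequences."""
--     common_sequences = [
--         "123", "abc", "qwerty", "password", "admin", "letmein", "welcome"
--     ]
--     password_lower = password.lower()
--     for seq in common_sequences:
--         if seq in password_lower:
--             return True
--     return False
-- ===== SOURCE B (Python) =====
-- import string
--
--
-- def check_password_warnings(password):
--     """Check for common password weaknesses (single pass over the characters)."""
--     has_upper = has_lower = has_digit = has_punct = has_space = False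
--     for c in password:
--         has_upper = has_upper or c in string.ascii_uppercase
--         has_lower = has_lower or c in string.ascii_lowercase
--         has_digit = has_digit or c in string.digits
--         has_punct = has_punct or c in string.punctuation
--         has_space = has_space or c == " "
--     lowered = password.lower()
--     seqs = ("123", "abc", "qwerty", "password", "admin", "letmein", "welcome")
--     has_common = any(
--         lowered[i:i + len(seq)] == seq
--         for i in range(len(lowered))
--         for seq in seqs
--     )
--     warnings = []
--     if len(password) < 8:
--         warnings.append("Password is too short (less than 8 characters).")
--     if not has_upper:
--         warnings.append("Password lacks uppercase letters.")
--     if not has_lower: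
--         warnings.append("Password lacks lowercase letters.")
--     if not has_digit:
--         warnings.append("Password lacks digits.")
--     if not has_punct:
--         warnings.append("Password lacks special characters.")
--     if has_space:
--         warnings.append("Password contains spaces, which may not be supported by all systems.")
--     if has_common:
--         warnings.append("Password contains a common sequence or pattern.")
--     return warnings
-- ===== Notes on version B (the rewrite author's own statement) =====
-- stated objective: alternative
-- what changed: B replaces A's five separate any(...) scans over the password with one single pass that accumulates the five character-class flags, and replaces is_common_sequence's per-sequence substring search with one positional scan over the lowered password checking each common sequence at each index.
import Mathlib
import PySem

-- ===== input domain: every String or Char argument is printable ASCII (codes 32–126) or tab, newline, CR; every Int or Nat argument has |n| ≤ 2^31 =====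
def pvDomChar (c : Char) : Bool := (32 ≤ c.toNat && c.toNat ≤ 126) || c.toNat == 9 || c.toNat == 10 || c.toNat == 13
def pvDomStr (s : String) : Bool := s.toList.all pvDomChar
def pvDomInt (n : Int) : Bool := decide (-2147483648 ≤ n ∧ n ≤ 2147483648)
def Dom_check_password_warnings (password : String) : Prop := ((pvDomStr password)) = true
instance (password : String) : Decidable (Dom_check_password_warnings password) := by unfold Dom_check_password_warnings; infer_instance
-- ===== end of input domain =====

-- B replaces A's five separate `any` scans by a single pass that accumulates the five flags,
-- and replaces `is_common_sequence`'s per-sequence substring search by one positional scan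
-- over the lowered password; objective: an alternative single-pass decomposition of the same cost.

-- ===== PORT A =====
-- string.ascii_uppercase / ascii_lowercase / digits / punctuation, as char lists
def pyUpper : List Char := "ABCDEFGHIJKLMNOPQRSTUVWXYZ".toList
def pyLower : List Char := "abcdefghijklmnopqrstuvwxyz".toList
def pyDigits : List Char := "0123456789".toList
def pyPunct : List Char := "!\"#$%&'()*+,-./:;<=>?@[\\]^_`{|}~".toList

def pySeqs : List (List Char) :=
  ["123".toList, "abc".toList, "qwerty".toList, "password".toList,
   "admin".toList, "letmein".toList, "welcome".toList]

-- for seq in common_sequences: if seq in password_lower: return True; return False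
def is_common_sequence (password : String) : Bool :=
  let password_lower := PySem.Chars.lower password.toList
  pySeqs.any (fun seq => PySem.Chars.isIn seq password_lower)

-- each `c in string.X` tests a single character, so it is char membership in the constant
def check_password_warnings (password : String) : List String :=
  let cs := password.toList
  let warnings : List String := []
  let warnings := if cs.length < 8 then
      warnings ++ ["Password is too short (less than 8 characters)."] else warnings
  let warnings := if !(cs.any (fun c => pyUpper.contains c)) then
      warnings ++ ["Password lacks uppercase letters."] else warnings
  let warnings := if !(cs.any (fun c => pyLower.contains c)) then
      warnings ++ ["Password lacks lowercase letters."] else warnings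
  let warnings := if !(cs.any (fun c => pyDigits.contains c)) then
      warnings ++ ["Password lacks digits."] else warnings
  let warnings := if !(cs.any (fun c => pyPunct.contains c)) then
      warnings ++ ["Password lacks special characters."] else warnings
  let warnings := if PySem.Chars.isIn [' '] cs then
      warnings ++ ["Password contains spaces, which may not be supported by all systems."] else warnings
  let warnings := if is_common_sequence password then
      warnings ++ ["Password contains a common sequence or pattern."] else warnings
  warnings

-- ===== PORT B =====
-- one fold over the characters accumulating (has_upper, has_lower, has_digit, has_punct, has_space)
def cpwFlags (cs : List Char) : Bool × Bool × Bool × Bool × Bool :=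
  cs.foldl (fun f c =>
      (f.1 || pyUpper.contains c,
       f.2.1 || pyLower.contains c,
       f.2.2.1 || pyDigits.contains c,
       f.2.2.2.1 || pyPunct.contains c,
       f.2.2.2.2 || (c == ' ')))
    (false, false, false, false, false)

def check_password_warnings_alt (password : String) : List String :=
  let cs := password.toList
  let f := cpwFlags cs
  let lowered := PySem.Chars.lower cs
  -- any(lowered[i:i+len(seq)] == seq for i in range(len(lowered)) for seq in seqs)
  let hasCommon := (List.range lowered.length).any (fun i =>
      pySeqs.any (fun q =>
        PySem.List.slice lowered (some (i : Int)) (some ((i : Int) + (q.length : Int))) == q))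
  let warnings : List String := []
  let warnings := if cs.length < 8 then
      warnings ++ ["Password is too short (less than 8 characters)."] else warnings
  let warnings := if !f.1 then
      warnings ++ ["Password lacks uppercase letters."] else warnings
  let warnings := if !f.2.1 then
      warnings ++ ["Password lacks lowercase letters."] else warnings
  let warnings := if !f.2.2.1 then
      warnings ++ ["Password lacks digits."] else warnings
  let warnings := if !f.2.2.2.1 then
      warnings ++ ["Password lacks special characters."] else warnings
  let warnings := if f.2.2.2.2 then
      warnings ++ ["Password contains spaces, which may not be supported by all systems."] else warnings
  let warnings := if hasCommon then
      warnings ++ ["Password contains a common sequence or pattern."] else warnings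
  warnings

-- ===== PRECONDITION & SPEC =====
def Spec_check_password_warnings (password : String) (out : List String) : Prop := out = check_password_warnings_alt password
instance (password : String) (out : List String) : Decidable (Spec_check_password_warnings password out) := by unfold Spec_check_password_warnings; infer_instance

-- ===== CLAIM (what is proved, stated in full; the proofs are below) =====
def Claim_equal_check_password_warnings : Prop := ∀ (password : String), Dom_check_password_warnings password → Spec_check_password_warnings password (check_password_warnings password)

-- ===== LEMMAS AND PROOFS =====

-- the flag fold computes the five `any` scans, for any initial flags
lemma cpwFlags_go (cs : List Char) (a b c d e : Bool) :
    cs.foldl (fun f c =>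
      (f.1 || pyUpper.contains c,
       f.2.1 || pyLower.contains c,
       f.2.2.1 || pyDigits.contains c,
       f.2.2.2.1 || pyPunct.contains c,
       f.2.2.2.2 || (c == ' ')))
      (a, b, c, d, e)
    = (a || cs.any (fun c => pyUpper.contains c),
       b || cs.any (fun c => pyLower.contains c),
       c || cs.any (fun c => pyDigits.contains c),
       d || cs.any (fun c => pyPunct.contains c),
       e || cs.any (fun c => c == ' ')) := by
  induction cs generalizing a b c d e with
  | nil => simp
  | cons x xs ih => rw [List.foldl_cons, ih]; simp [Bool.or_assoc]

lemma cpwFlags_spec (cs : List Char) :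
    cpwFlags cs
    = (cs.any (fun c => pyUpper.contains c),
       cs.any (fun c => pyLower.contains c),
       cs.any (fun c => pyDigits.contains c),
       cs.any (fun c => pyPunct.contains c),
       cs.any (fun c => c == ' ')) := by
  rw [cpwFlags, cpwFlags_go]; simp

-- " " in password  =  some character is a space
lemma isIn_space (cs : List Char) :
    PySem.Chars.isIn [' '] cs = cs.any (fun c => c == ' ') := by
  rcases h : cs.any (fun c => c == ' ') with _ | _
  · simp only [List.any_eq_false, beq_iff_eq] at h
    rcases h' : PySem.Chars.isIn [' '] cs with _ | _
    · rfl
    · have := (PySem.Chars.isIn_iff_infix [' '] cs).1 h'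
      rw [List.singleton_infix_iff] at this
      exact absurd rfl (h _ this)
  · rw [(PySem.Chars.isIn_iff_infix [' '] cs).2]
    rw [List.singleton_infix_iff]
    simp only [List.any_eq_true, beq_iff_eq] at h
    rcases h with ⟨x, hx, rfl⟩
    exact hx

-- nonempty infix ↔ a matching take at some position strictly inside the list
lemma infix_iff_pos (q l : List Char) (hq : q ≠ []) :
    q <:+: l ↔ ∃ i < l.length, (l.drop i).take q.length = q := by
  constructor
  · rintro ⟨pre, suf, rfl⟩
    refine ⟨pre.length, ?_, ?_⟩
    · have : 0 < q.length := List.length_pos_of_ne_nil hq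
      simp; omega
    · simp [List.drop_left', List.take_left']
  · rintro ⟨i, hi, hq'⟩
    have h1 : q <+: l.drop i := hq' ▸ List.take_prefix _ _
    exact h1.isInfix.trans (List.drop_suffix i l).isInfix

-- the per-sequence substring loop equals the positional scan
lemma common_eq (l : List Char) :
    pySeqs.any (fun seq => PySem.Chars.isIn seq l)
    = (List.range l.length).any (fun i =>
        pySeqs.any (fun q =>
          PySem.List.slice l (some (i : Int)) (some ((i : Int) + (q.length : Int))) == q)) := by
  rw [Bool.eq_iff_iff]
  simp only [List.any_eq_true, List.mem_range, beq_iff_eq, PySem.List.slice_natCast_add,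
    PySem.Chars.isIn_iff_infix]
  constructor
  · rintro ⟨q, hq, hinf⟩
    have hne : q ≠ [] := by
      revert hq; unfold pySeqs; intro hq; fin_cases hq <;> simp
    rcases (infix_iff_pos q l hne).1 hinf with ⟨i, hi, hit⟩
    exact ⟨i, hi, q, hq, hit⟩
  · rintro ⟨i, hi, q, hq, hit⟩
    have hne : q ≠ [] := by
      revert hq; unfold pySeqs; intro hq; fin_cases hq <;> simp
    exact ⟨q, hq, (infix_iff_pos q l hne).2 ⟨i, hi, hit⟩⟩

-- ===== VERDICT (by name: the statement is the Claim_ definition above) =====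
theorem check_password_warnings_spec : Claim_equal_check_password_warnings := by
  intro password _
  show _ = _
  simp only [check_password_warnings, check_password_warnings_alt, is_common_sequence,
    cpwFlags_spec, isIn_space, common_eq]
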